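-- pv_equiv track=rewrite | github.com/dafdaf1234444/swarm | tools/index_organizer.py | build_theme_lessons
-- ===== SOURCE A (Python) =====
-- from collections import Counter, defaultdict
--
-- def build_theme_lessons(mapping, themes):
--     """Build reverse map: theme_name -> [lesson_ids]."""
--     theme_lessons = defaultdict(list)
--     theme_names = set(themes.keys())
--
--     def best_match(raw):
--         if raw in theme_names:
--             return raw
--         raw_w = set(raw.lower().split())
--         best, best_s = None, 0
--         for tn in theme_names:
--             overlap = len(raw_w & set(tn.lower().split()))
--             if overlap > best_s:
--                 best_s = overlap
--                 best = tn
--         return best if best_s >= 2 else raw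
--
--     for lid, theme in mapping.items():
--         theme_lessons[best_match(theme)].append(lid)
--     return dict(theme_lessons)
-- ===== SOURCE B (Python) =====
-- from collections import Counter
--
-- def build_theme_lessons(mapping, themes):
--     """Build reverse map: theme_name -> [lesson_ids] via an inverted word->theme index."""
--     names = list(themes)
--     words = [set(tn.lower().split()) for tn in names]
--     index = {}
--     for i, ws in enumerate(words):
--         for w in ws:
--             index.setdefault(w, []).append(i)
--     out = {}
--     for lid, raw in mapping.items():
--         if raw in themes:
--             key = raw
--         else:
--             counts = Counter()
--             for w in set(raw.lower().split()):
--                 counts.update(index.get(w, ()))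
--             best_i, best_s = None, 1
--             for i, s in counts.items():
--                 if s > best_s or (s == best_s and best_i is not None and i < best_i):
--                     best_i, best_s = i, s
--             key = names[best_i] if best_i is not None else raw
--         out.setdefault(key, []).append(lid)
--     return out
-- ===== Notes on version B (the rewrite author's own statement) =====
-- stated objective: faster
-- what changed: Instead of intersecting the lesson theme's word set with every theme name's word set (a full scan of all themes per lesson), B precomputes an inverted word->theme-index once and, per lesson, accumulates overlap counts with a Counter over only the themes that share a word, then takes the best-scoring index (smallest index on a tie).
import Mathlib
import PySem

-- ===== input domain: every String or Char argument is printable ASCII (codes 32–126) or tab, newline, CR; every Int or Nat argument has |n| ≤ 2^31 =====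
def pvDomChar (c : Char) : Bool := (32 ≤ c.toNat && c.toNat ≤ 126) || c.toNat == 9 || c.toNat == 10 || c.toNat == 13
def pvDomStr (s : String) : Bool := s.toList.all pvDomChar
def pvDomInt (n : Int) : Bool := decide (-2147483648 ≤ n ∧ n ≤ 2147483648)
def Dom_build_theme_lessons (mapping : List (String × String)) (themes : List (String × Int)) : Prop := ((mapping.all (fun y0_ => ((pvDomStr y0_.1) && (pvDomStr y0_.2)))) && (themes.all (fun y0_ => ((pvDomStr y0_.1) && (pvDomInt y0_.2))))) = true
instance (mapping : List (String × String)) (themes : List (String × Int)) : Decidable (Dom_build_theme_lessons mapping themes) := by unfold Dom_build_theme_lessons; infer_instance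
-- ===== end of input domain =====

-- B replaces A's per-lesson scan over all theme-name word sets by a precomputed inverted word->theme index
-- with Counter accumulation (objective: faster; Pre_ excludes overlap-score ties, where Python A's answer
-- depends on set iteration order).


-- ===== PORT A =====
-- set(s.lower().split())
def pvWords (s : String) : PySem.Set String :=
  PySem.Set.ofList (PySem.Str.split₀ (PySem.Str.lower s))

-- A's best_match: linear scan over the theme names, keeping the first strictly improving overlap.
-- (Python iterates a SET here; the port iterates the names in key-insertion order — exact under
-- Pre_build_theme_lessons, which rules out ties at a maximal overlap ≥ 2.)
def pvBestMatchA (themeNames : PySem.Set String) (raw : String) : String :=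
  if PySem.Set.contains themeNames raw then raw
  else
    let rawW := pvWords raw
    let r := themeNames.foldl
      (fun (st : Option String × Nat) tn =>
        let overlap := (PySem.Set.inter rawW (pvWords tn)).length
        if overlap > st.2 then (some tn, overlap) else st)
      (none, 0)
    if 2 ≤ r.2 then r.1.getD raw else raw

def build_theme_lessons (mapping : List (String × String)) (themes : List (String × Int)) : List (String × List String) :=
  let themeNames : PySem.Set String := PySem.Set.ofList (PySem.Dict.ofList themes).keys
  let d := (PySem.Dict.ofList mapping).items.foldl
    (fun (d : PySem.Dict String (List String)) p =>
      d.modify (pvBestMatchA themeNames p.2) [] (· ++ [p.1]))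
    PySem.Dict.empty
  d.items

-- ===== PORT B =====
-- B: names, per-name word sets, inverted index word -> list of theme indices.
def pvIndexB (words : List (PySem.Set String)) : PySem.Dict String (List Int) :=
  words.zipIdx.foldl
    (fun (d : PySem.Dict String (List Int)) p =>
      p.1.foldl (fun d w => d.modify w [] (· ++ [(p.2 : Int)])) d)
    PySem.Dict.empty

-- counts = Counter(); for w in set(raw.lower().split()): counts.update(index.get(w, ()))
def pvCountsB (index : PySem.Dict String (List Int)) (raw : String) : PySem.Dict Int Int :=
  (pvWords raw).foldl
    (fun (c : PySem.Dict Int Int) w =>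
      (index.getD w []).foldl (fun c i => c.modify i 0 (· + 1)) c)
    PySem.Dict.empty

-- best_i, best_s = None, 1; strictly better score, or equal score with a smaller index, wins
def pvBestB (counts : PySem.Dict Int Int) : Option Int × Int :=
  counts.items.foldl
    (fun (st : Option Int × Int) p =>
      if p.2 > st.2 || (p.2 == st.2 && (match st.1 with | some b => p.1 < b | none => false))
      then (some p.1, p.2) else st)
    (none, 1)

def build_theme_lessons_alt (mapping : List (String × String)) (themes : List (String × Int)) : List (String × List String) :=
  let themesD := PySem.Dict.ofList themes
  let names := themesD.keys
  let words := names.map pvWords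
  let index := pvIndexB words
  let out := (PySem.Dict.ofList mapping).items.foldl
    (fun (o : PySem.Dict String (List String)) q =>
      let key :=
        if themesD.contains q.2 then q.2
        else
          match (pvBestB (pvCountsB index q.2)).1 with
          | some i => (PySem.List.pyGet? names i).getD q.2   -- names[best_i]; best_i is always in range
          | none => q.2
      o.modify key [] (· ++ [q.1]))
    PySem.Dict.empty
  out.items

-- ===== PRECONDITION & SPEC =====
def pvScore (raw tn : String) : Nat := (PySem.Set.inter (pvWords raw) (pvWords tn)).length

-- the maximal overlap of raw's word set with any theme name's word set
def pvMaxScore (themes : List (String × Int)) (raw : String) : Nat :=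
  (((PySem.Dict.ofList themes).keys.map (pvScore raw)).foldl max 0)

-- Pre_ excludes inputs on which some lesson's theme string (not itself a theme name) has a maximal
-- word overlap ≥ 2 attained by two or more theme names: there Python A's answer is an accident of
-- set iteration order (hash order), which no port can reproduce.
def Pre_build_theme_lessons (mapping : List (String × String)) (themes : List (String × Int)) : Prop :=
  ∀ raw ∈ (PySem.Dict.ofList mapping).values,
    (PySem.Dict.ofList themes).contains raw = false →
    2 ≤ pvMaxScore themes raw →
      ((PySem.Dict.ofList themes).keys.countP
        (fun tn => pvScore raw tn = pvMaxScore themes raw)) ≤ 1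

instance (mapping : List (String × String)) (themes : List (String × Int)) : Decidable (Pre_build_theme_lessons mapping themes) := by
  unfold Pre_build_theme_lessons; infer_instance

def pvWitness_build_theme_lessons : (List (String × String)) × (List (String × Int)) :=
  ([("l1", "big red fox"), ("l2", "cats")], [("red fox", 1), ("dog", 2)])

def Spec_build_theme_lessons (mapping : List (String × String)) (themes : List (String × Int)) (out : List (String × List String)) : Prop := out = build_theme_lessons_alt mapping themes
instance (mapping : List (String × String)) (themes : List (String × Int)) (out : List (String × List String)) : Decidable (Spec_build_theme_lessons mapping themes out) := by unfold Spec_build_theme_lessons; infer_instance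

-- ===== CLAIM (what is proved, stated in full; the proofs are below) =====
def Claim_equal_build_theme_lessons : Prop := ∀ (mapping : List (String × String)) (themes : List (String × Int)), Dom_build_theme_lessons mapping themes → Pre_build_theme_lessons mapping themes → Spec_build_theme_lessons mapping themes (build_theme_lessons mapping themes)


-- ===== LEMMAS AND PROOFS =====

-- a loop whose body folds a sub-list is one fold over the flattened list
lemma pvFoldlFoldl_flatMap {A B C : Type} (L : List A) (g : A → List B) (h : C → B → C) (a : C) :
    L.foldl (fun acc p => (g p).foldl h acc) a = (L.flatMap g).foldl h a := by
  induction L generalizing a with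
  | nil => simp
  | cons p t ih => simp [List.flatMap_cons, List.foldl_append, ih]

-- spec of a "keep the better candidate" selection fold (shared shape of A's and B's argmax loops)
lemma pvSelFold_spec {B G : Type} [LinearOrder G]
    (cond : (B × G) → (Option B × G) → Prop) [inst : ∀ p st, Decidable (cond p st)]
    (hgt : ∀ p st, st.2 < p.2 → cond p st)
    (hle : ∀ p st, cond p st → st.2 ≤ p.2)
    (hnone : ∀ p st, st.1 = none → cond p st → st.2 < p.2)
    (L : List (B × G)) (st : Option B × G) :
    (L.foldl (fun st p => if cond p st then (some p.1, p.2) else st) st = st ∨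
      ∃ p ∈ L, L.foldl (fun st p => if cond p st then (some p.1, p.2) else st) st = (some p.1, p.2)) ∧
    st.2 ≤ (L.foldl (fun st p => if cond p st then (some p.1, p.2) else st) st).2 ∧
    (∀ p ∈ L, p.2 ≤ (L.foldl (fun st p => if cond p st then (some p.1, p.2) else st) st).2) ∧
    (st.1 = none → L.foldl (fun st p => if cond p st then (some p.1, p.2) else st) st = st ∨
      st.2 < (L.foldl (fun st p => if cond p st then (some p.1, p.2) else st) st).2) := by
  induction L generalizing st with
  | nil => simp
  | cons p t ih =>
    by_cases hc : cond p st
    · simp only [List.foldl_cons, if_pos hc]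
      obtain ⟨ih1, ih2, ih3, ih4⟩ := ih (some p.1, p.2)
      refine ⟨?_, le_trans (hle p st hc) ih2, ?_, ?_⟩
      · rcases ih1 with h | ⟨q, hq, h⟩
        · exact Or.inr ⟨p, List.mem_cons_self, h⟩
        · exact Or.inr ⟨q, List.mem_cons_of_mem _ hq, h⟩
      · intro q hq
        rcases List.mem_cons.1 hq with rfl | hq'
        · exact ih2
        · exact ih3 q hq'
      · intro hn
        exact Or.inr (lt_of_lt_of_le (hnone p st hn hc) ih2)
    · simp only [List.foldl_cons, if_neg hc]
      obtain ⟨ih1, ih2, ih3, ih4⟩ := ih st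
      refine ⟨?_, ih2, ?_, ih4⟩
      · rcases ih1 with h | ⟨q, hq, h⟩
        · exact Or.inl h
        · exact Or.inr ⟨q, List.mem_cons_of_mem _ hq, h⟩
      · intro q hq
        rcases List.mem_cons.1 hq with rfl | hq'
        · have : ¬ st.2 < q.2 := fun hlt => hc (hgt q st hlt)
          exact le_trans (not_lt.1 this) ih2
        · exact ih3 q hq'

-- names / pairs / flattened postings used by the counts characterisation
def pvPairs (names : List String) : List (String × Int) :=
  (((names).map pvWords).zipIdx).flatMap (fun p => p.1.map (fun w => (w, (p.2 : Int))))
def pvFlat2 (names : List String) (raw : String) : List Int :=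
  (pvWords raw).flatMap (fun w => (pvIndexB ((names).map pvWords)).getD w [])

lemma pvWords_nodup (s : String) : (pvWords s).Nodup := PySem.Set.nodup_ofList _

lemma pvIndexB_eq_flat (names : List String) :
    pvIndexB ((names).map pvWords) =
      (pvPairs names).foldl (fun d q => d.modify q.1 [] (· ++ [q.2])) PySem.Dict.empty := by
  unfold pvIndexB pvPairs
  rw [← pvFoldlFoldl_flatMap]
  refine PySem.List.foldl_congr_mem _ _ _ _ ?_
  intro acc p _
  rw [List.foldl_map]

lemma pvIndexB_getD (names : List String) (w : String) :
    (pvIndexB ((names).map pvWords)).getD w [] =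
      ((pvPairs names).filter (fun q => q.1 == w)).map (·.2) := by
  rw [pvIndexB_eq_flat, PySem.Dict.getD_foldl_modify_append, PySem.Dict.getD_empty]
  simp

-- flatMap/filter/map bookkeeping for the postings of one word over nodup word sets
lemma pvPostings_aux (w : String) (L : List (List String × Nat)) (h : ∀ p ∈ L, p.1.Nodup) :
    L.flatMap (fun p => (((p.1.map (fun w' => (w', (p.2 : Int)))).filter (fun q => q.1 == w)).map (·.2))) =
      (L.filter (fun p => p.1.contains w)).map (fun p => ((p.2 : Int))) := by
  induction L with
  | nil => simp
  | cons p t ih =>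
    have hnd : p.1.Nodup := h p List.mem_cons_self
    have ih' := ih (fun q hq => h q (List.mem_cons_of_mem _ hq))
    rw [List.flatMap_cons, ih']
    have hhead : ((p.1.map (fun w' => (w', (p.2 : Int)))).filter (fun q => q.1 == w)).map
        (fun q => q.2) = if p.1.contains w then [((p.2 : Int))] else [] := by
      rw [List.filter_map]
      have : ((fun q : String × Int => q.1 == w) ∘ (fun w' => (w', (p.2 : Int)))) =
          (fun w' => w' == w) := rfl
      rw [this, List.filter_beq]
      by_cases hw : w ∈ p.1
      · rw [List.count_eq_one_of_mem hnd hw]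
        simp [hw]
      · rw [List.count_eq_zero_of_not_mem hw]
        simp [hw]
    rw [hhead, List.filter_cons]
    by_cases hw : w ∈ p.1
    · simp [hw]
    · simp [hw]

-- the postings list for w, as a filtered enumeration of the theme word sets
lemma pvIndexB_getD' (names : List String) (w : String) :
    (pvIndexB ((names).map pvWords)).getD w [] =
      ((((names).map pvWords).zipIdx).filter (fun p => p.1.contains w)).map
        (fun p => ((p.2 : Int))) := by
  rw [pvIndexB_getD]
  unfold pvPairs
  rw [List.filter_flatMap, List.map_flatMap]
  refine pvPostings_aux w _ ?_
  rintro ⟨x, i⟩ hp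
  rcases List.getElem?_eq_some_iff.1 (List.mk_mem_zipIdx_iff_getElem?.1 hp) with ⟨hi, hx⟩
  rcases List.mem_map.1 (hx ▸ List.getElem_mem hi) with ⟨tn, _, he⟩
  rw [← he]
  exact pvWords_nodup tn

-- the postings of one word have pairwise distinct indices
lemma pvPostings_nodup (names : List String) (w : String) :
    (((((names).map pvWords).zipIdx).filter (fun p => p.1.contains w)).map
        (fun p => ((p.2 : Int)))).Nodup := by
  have h1 : ((((names).map pvWords).zipIdx).filter (fun p => p.1.contains w)).map
      Prod.snd |>.Sublist ((((names).map pvWords).zipIdx).map Prod.snd) :=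
    List.Sublist.map Prod.snd List.filter_sublist
  rw [List.zipIdx_map_snd] at h1
  have h2 := (List.nodup_range' (s := 0) (n := ((names).map pvWords).length)).sublist h1
  have h3 := h2.map (f := fun n : Nat => (n : Int)) (fun a b h => by simpa using h)
  rw [List.map_map] at h3
  exact h3

-- membership in the postings of one word
lemma pvPostings_mem (names : List String) (w : String) (i : Int) :
    i ∈ ((((names).map pvWords).zipIdx).filter (fun p => p.1.contains w)).map
        (fun p => ((p.2 : Int))) ↔
      ∃ j : Nat, ∃ hj : j < (names).length,
        i = (j : Int) ∧ (pvWords ((names)[j])).contains w := by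
  rw [List.mem_map]
  constructor
  · rintro ⟨⟨x, k⟩, hp, rfl⟩
    rcases List.mem_filter.1 hp with ⟨hpz, hpc⟩
    rcases List.getElem?_eq_some_iff.1 (List.mk_mem_zipIdx_iff_getElem?.1 hpz) with ⟨hi, hx⟩
    have hlt : k < (names).length := by simpa using hi
    refine ⟨k, hlt, rfl, ?_⟩
    have hx' : x = pvWords ((names)[k]) := by
      rw [← hx]
      simp only [List.getElem_map]
    rw [← hx']
    exact hpc
  · rintro ⟨j, hj, rfl, hc⟩
    have hz : (pvWords ((names)[j]), j) ∈ (((names).map pvWords).zipIdx) := by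
      rw [List.zipIdx_map]
      refine List.mem_map.2 ⟨((names)[j], j), ?_, rfl⟩
      exact List.mk_mem_zipIdx_iff_getElem?.2 (List.getElem?_eq_some_iff.2 ⟨hj, rfl⟩)
    refine ⟨(pvWords ((names)[j]), j), ?_, rfl⟩
    exact List.mem_filter.2 ⟨hz, hc⟩

-- count of index j in the postings of one word
lemma pvPostings_count (names : List String) (w : String) (j : Nat)
    (hj : j < (names).length) :
    (((((names).map pvWords).zipIdx).filter (fun p => p.1.contains w)).map
        (fun p => ((p.2 : Int)))).count ((j : Int)) =
      (if (pvWords ((names)[j])).contains w then 1 else 0) := by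
  by_cases hc : (pvWords ((names)[j])).contains w
  · rw [if_pos hc]
    exact List.count_eq_one_of_mem (pvPostings_nodup names w)
      ((pvPostings_mem names w _).2 ⟨j, hj, rfl, hc⟩)
  · rw [if_neg hc]
    refine List.count_eq_zero_of_not_mem ?_
    intro hmem
    rcases (pvPostings_mem names w _).1 hmem with ⟨j', hj', hje, hc'⟩
    have hjj : j' = j := by omega
    subst hjj
    exact hc hc'

lemma pvCountsB_eq_flat (names : List String) (raw : String) :
    pvCountsB (pvIndexB ((names).map pvWords)) raw =
      (pvFlat2 names raw).foldl (fun c i => c.modify i 0 (· + 1)) PySem.Dict.empty := by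
  unfold pvCountsB pvFlat2
  rw [← pvFoldlFoldl_flatMap]

lemma pvCountsB_getD (names : List String) (raw : String) (i : Int) :
    (pvCountsB (pvIndexB ((names).map pvWords)) raw).getD i 0 =
      ((pvFlat2 names raw).count i : Int) := by
  rw [pvCountsB_eq_flat, PySem.Dict.getD_foldl_modify_add_one, PySem.Dict.getD_empty]
  ring

lemma pvCountsB_keys (names : List String) (raw : String) :
    (pvCountsB (pvIndexB ((names).map pvWords)) raw).keys =
      PySem.Set.ofList (pvFlat2 names raw) := by
  rw [pvCountsB_eq_flat, PySem.Dict.keys_foldl_modify, PySem.Dict.keys_empty,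
    PySem.Set.ofList_eq_foldl]
  rfl

lemma pvScore_countP (raw tn : String) :
    pvScore raw tn = (pvWords raw).countP (fun w => (pvWords tn).contains w) := by
  unfold pvScore PySem.Set.inter
  rw [List.countP_eq_length_filter]

-- count of index j in the flattened postings = overlap score of theme j
lemma pvSum_ite (l : List String) (p : String → Bool) :
    (l.map (fun w => if p w then 1 else 0)).sum = l.countP p := by
  induction l with
  | nil => simp
  | cons a t ih => by_cases h : p a <;> simp [h, ih, Nat.add_comm]

lemma pvFlat2_count (names : List String) (raw : String) (j : Nat)
    (hj : j < (names).length) :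
    (pvFlat2 names raw).count ((j : Int)) = pvScore raw ((names)[j]) := by
  unfold pvFlat2
  rw [List.count_flatMap]
  have h1 : ∀ w ∈ pvWords raw,
      (List.count ((j : Int)) ∘ fun w => (pvIndexB ((names).map pvWords)).getD w []) w =
        (fun w => if (pvWords ((names)[j])).contains w then 1 else 0) w := by
    intro w _
    simp only [Function.comp]
    rw [pvIndexB_getD', pvPostings_count names w j hj]
  rw [List.map_congr_left h1, pvSum_ite, pvScore_countP]

lemma pvFlat2_mem (names : List String) (raw : String) (i : Int) :
    i ∈ pvFlat2 names raw ↔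
      ∃ j : Nat, ∃ hj : j < (names).length,
        i = (j : Int) ∧ 0 < pvScore raw ((names)[j]) := by
  unfold pvFlat2
  rw [List.mem_flatMap]
  constructor
  · rintro ⟨w, hw, hmem⟩
    rw [pvIndexB_getD'] at hmem
    rcases (pvPostings_mem names w i).1 hmem with ⟨j, hj, rfl, hc⟩
    refine ⟨j, hj, rfl, ?_⟩
    rw [pvScore_countP]
    exact List.countP_pos_iff.2 ⟨w, hw, hc⟩
  · rintro ⟨j, hj, rfl, hpos⟩
    rw [pvScore_countP] at hpos
    rcases List.countP_pos_iff.1 hpos with ⟨w, hw, hc⟩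
    refine ⟨w, hw, ?_⟩
    rw [pvIndexB_getD']
    exact (pvPostings_mem names w _).2 ⟨j, hj, rfl, hc⟩

lemma pvCountsB_items (names : List String) (raw : String) :
    (pvCountsB (pvIndexB ((names).map pvWords)) raw).items =
      (PySem.Set.ofList (pvFlat2 names raw)).map
        (fun i => (i, ((pvFlat2 names raw).count i : Int))) := by
  rw [PySem.Dict.items_eq_map_keys _ (by rw [pvCountsB_keys]; exact PySem.Set.nodup_ofList _) 0,
    pvCountsB_keys]
  refine List.map_congr_left ?_
  intro i _
  rw [pvCountsB_getD]

lemma pvItems_mem (names : List String) (raw : String) (p : Int × Int)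
    (hp : p ∈ (pvCountsB (pvIndexB ((names).map pvWords)) raw).items) :
    ∃ j : Nat, ∃ hj : j < (names).length,
      p = ((j : Int), (pvScore raw ((names)[j]) : Int)) ∧
      0 < pvScore raw ((names)[j]) := by
  rw [pvCountsB_items] at hp
  rcases List.mem_map.1 hp with ⟨i, hi, rfl⟩
  have hi' : i ∈ pvFlat2 names raw := (PySem.Set.mem_ofList _ _).1 hi
  rcases (pvFlat2_mem names raw i).1 hi' with ⟨j, hj, rfl, hpos⟩
  exact ⟨j, hj, by rw [pvFlat2_count names raw j hj], hpos⟩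

lemma pvItems_mem' (names : List String) (raw : String) (j : Nat)
    (hj : j < (names).length) (hpos : 0 < pvScore raw ((names)[j])) :
    ((j : Int), (pvScore raw ((names)[j]) : Int)) ∈
      (pvCountsB (pvIndexB ((names).map pvWords)) raw).items := by
  rw [pvCountsB_items]
  have hmem : ((j : Int)) ∈ pvFlat2 names raw := (pvFlat2_mem names raw _).2 ⟨j, hj, rfl, hpos⟩
  have := List.mem_map_of_mem (f := fun i => (i, ((pvFlat2 names raw).count i : Int)))
    ((PySem.Set.mem_ofList _ _).2 hmem)
  simp only at this
  rw [pvFlat2_count names raw j hj] at this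
  exact this

lemma pvMaxScore_bound (themes : List (String × Int)) (raw : String) :
    ∀ tn ∈ (PySem.Dict.ofList themes).keys, pvScore raw tn ≤ pvMaxScore themes raw := by
  intro tn htn
  unfold pvMaxScore
  exact (PySem.List.le_foldl_max _ 0).2 _ (List.mem_map_of_mem htn)

lemma pvMaxScore_attained (themes : List (String × Int)) (raw : String) :
    pvMaxScore themes raw = 0 ∨ ∃ tn ∈ (PySem.Dict.ofList themes).keys, pvMaxScore themes raw = pvScore raw tn := by
  unfold pvMaxScore
  rcases PySem.List.foldl_max_mem (((PySem.Dict.ofList themes).keys).map (pvScore raw)) 0 with h | h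
  · exact Or.inl h
  · rcases List.mem_map.1 h with ⟨tn, htn, he⟩
    exact Or.inr ⟨tn, htn, he.symm⟩

lemma pvUnique_of_countP {l : List String} (q : String → Bool)
    (hc : l.countP q ≤ 1) {a b : String} (ha : a ∈ l) (hb : b ∈ l)
    (hqa : q a = true) (hqb : q b = true) : a = b := by
  have ha' : a ∈ l.filter q := List.mem_filter.2 ⟨ha, hqa⟩
  have hb' : b ∈ l.filter q := List.mem_filter.2 ⟨hb, hqb⟩
  have hlen : (l.filter q).length ≤ 1 := by
    rw [← List.countP_eq_length_filter]; exact hc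
  match hl : l.filter q, hlen with
  | [], _ => rw [hl] at ha'; cases ha'
  | [x], _ =>
    rw [hl] at ha' hb'
    simp at ha' hb'
    rw [ha', hb']

-- the per-lesson keys agree
lemma pvKey_eq (themes : List (String × Int)) (raw : String)
    (hpre : (PySem.Dict.ofList themes).contains raw = false →
      2 ≤ pvMaxScore themes raw →
      ((PySem.Dict.ofList themes).keys.countP (fun tn => pvScore raw tn = pvMaxScore themes raw)) ≤ 1) :
    pvBestMatchA (PySem.Set.ofList (PySem.Dict.ofList themes).keys) raw =
      (if (PySem.Dict.ofList themes).contains raw then raw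
       else
        match (pvBestB (pvCountsB (pvIndexB ((PySem.Dict.ofList themes).keys.map pvWords)) raw)).1 with
        | some i => (PySem.List.pyGet? (PySem.Dict.ofList themes).keys i).getD raw
        | none => raw) := by
  have hnd : ((PySem.Dict.ofList themes).keys).Nodup := PySem.Dict.nodup_keys_ofList themes
  have hset : PySem.Set.ofList ((PySem.Dict.ofList themes).keys) = (PySem.Dict.ofList themes).keys :=
    PySem.Set.ofList_eq_self_of_nodup _ hnd
  have hguard : PySem.Set.contains ((PySem.Dict.ofList themes).keys) raw =
      (PySem.Dict.ofList themes).contains raw := by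
    rw [PySem.Dict.contains_eq_decide_mem_keys]
    simp [PySem.Set.contains]
  by_cases hin : (PySem.Dict.ofList themes).contains raw = true
  · have hraw_in : raw ∈ (PySem.Dict.ofList themes).keys := by
      simpa [PySem.Dict.contains_eq_decide_mem_keys] using hin
    simp [pvBestMatchA, hset, hin]
    intro hmem
    exact absurd hraw_in hmem
  · have hin' : (PySem.Dict.ofList themes).contains raw = false := by
      simpa using hin
    set nm := (PySem.Dict.ofList themes).keys with hnm
    -- A's selection fold
    obtain ⟨hA1, hA2, hA3, hA4⟩ := pvSelFold_spec (B := String) (G := Nat)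
      (fun p st => st.2 < p.2) (fun p st h => h) (fun p st h => le_of_lt h) (fun p st _ h => h)
      (nm.map (fun tn => (tn, pvScore raw tn))) (none, 0)
    set rA := (nm.map (fun tn => (tn, pvScore raw tn))).foldl
      (fun st p => if st.2 < p.2 then (some p.1, p.2) else st) (none, 0) with hrA
    -- B's selection fold
    obtain ⟨hB1, hB2, hB3, hB4⟩ := pvSelFold_spec (B := Int) (G := Int)
      (fun p st => (p.2 > st.2 || (p.2 == st.2 &&
        match st.1 with | some b => decide (p.1 < b) | none => false)) = true)
      (fun p st h => by simp only [Bool.or_eq_true, decide_eq_true_eq]; exact Or.inl h)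
      (fun p st h => by
        simp only [Bool.or_eq_true, Bool.and_eq_true, decide_eq_true_eq, beq_iff_eq] at h
        rcases h with h | ⟨h, _⟩
        · exact le_of_lt h
        · exact le_of_eq h.symm)
      (fun p st hn h => by
        simp only [hn] at h
        simpa using h)
      ((pvCountsB (pvIndexB (nm.map pvWords)) raw).items) (none, 1)
    set rB := ((pvCountsB (pvIndexB (nm.map pvWords)) raw).items).foldl
      (fun st p => if (p.2 > st.2 || (p.2 == st.2 &&
        match st.1 with | some b => decide (p.1 < b) | none => false)) = true
        then (some p.1, p.2) else st) (none, 1) with hrB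
    have hBfold : pvBestB (pvCountsB (pvIndexB (nm.map pvWords)) raw) = rB := rfl
    -- rewrite A's side into rA
    have hAeq : pvBestMatchA (PySem.Set.ofList nm) raw =
        (if 2 ≤ rA.2 then rA.1.getD raw else raw) := by
      unfold pvBestMatchA
      rw [hset, hguard, hin']
      have hfold : nm.foldl
          (fun (st : Option String × Nat) tn =>
            if (PySem.Set.inter (pvWords raw) (pvWords tn)).length > st.2
            then (some tn, (PySem.Set.inter (pvWords raw) (pvWords tn)).length) else st)
          (none, 0) = rA := by
        rw [hrA, List.foldl_map]
        rfl
      simp only [Bool.false_eq_true, if_false]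
      rw [← hfold]
    rw [hAeq, hBfold]
    simp only [hin', Bool.false_eq_true, if_false]
    by_cases h2 : 2 ≤ rA.2
    · -- a best theme with overlap ≥ 2 exists; both sides pick the unique argmax
      rw [if_pos h2]
      rcases hA1 with hA0 | ⟨p, hp, hpeq⟩
      · rw [hA0] at h2; omega
      rcases List.mem_map.1 hp with ⟨tnA, htnA, rfl⟩
      -- the maximal score equals tnA's score
      have hMub : pvMaxScore themes raw ≤ pvScore raw tnA := by
        rcases pvMaxScore_attained themes raw with h0 | ⟨tn', htn', heq⟩
        · omega
        · have := hA3 (tn', pvScore raw tn')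
            (List.mem_map_of_mem (f := fun tn => (tn, pvScore raw tn)) htn')
          rw [hpeq] at this
          omega
      have hMlb : pvScore raw tnA ≤ pvMaxScore themes raw := pvMaxScore_bound themes raw tnA htnA
      have hMeq : pvScore raw tnA = pvMaxScore themes raw := le_antisymm hMlb hMub
      have h2' : 2 ≤ rA.2 := h2
      rw [hpeq] at h2'
      have h2M : 2 ≤ pvMaxScore themes raw := by omega
      have hcount := hpre hin' h2M
      -- tnA sits at some index jA
      rcases List.mem_iff_getElem.1 htnA with ⟨jA, hjA, hgA⟩
      have hposA : 0 < pvScore raw (nm[jA]) := by rw [hgA]; omega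
      have hpA := pvItems_mem' nm raw jA hjA hposA
      have hvA := hB3 _ hpA
      have hvA' : (pvMaxScore themes raw : Int) ≤ rB.2 := by
        have : pvScore raw (nm[jA]) = pvMaxScore themes raw := by rw [hgA, hMeq]
        rw [this] at hvA
        exact hvA
      -- rB came from a real item
      rcases hB1 with hB0 | ⟨q, hq, hqeq⟩
      · rw [hB0] at hvA'
        simp at hvA'
        omega
      rcases pvItems_mem nm raw q hq with ⟨jB, hjB, hqe, hqpos⟩
      have hscB : pvScore raw (nm[jB]) = pvMaxScore themes raw := by
        have hub : pvScore raw (nm[jB]) ≤ pvMaxScore themes raw :=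
          pvMaxScore_bound themes raw _ (List.getElem_mem hjB)
        have hlb : (pvMaxScore themes raw : Int) ≤ (pvScore raw (nm[jB]) : Int) := by
          rw [hqe] at hqeq
          rw [hqeq] at hvA'
          exact hvA'
        omega
      -- uniqueness of the argmax
      have huniq : nm[jB] = tnA := by
        refine pvUnique_of_countP _ hcount (List.getElem_mem hjB) htnA ?_ ?_
        · exact decide_eq_true hscB
        · exact decide_eq_true hMeq
      rw [hqe] at hqeq
      rw [hqeq, hpeq]
      simp only [Option.getD_some]
      rw [PySem.List.pyGet?_natCast, List.getElem?_eq_getElem hjB]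
      simp [huniq]
    · -- no overlap ≥ 2 anywhere: both sides keep the raw theme string
      rw [if_neg h2]
      rcases hB1 with hB0 | ⟨q, hq, hqeq⟩
      · rw [hB0]
      rcases pvItems_mem nm raw q hq with ⟨jB, hjB, hqe, _⟩
      rcases hB4 rfl with hB0 | hBgt
      · rw [hB0]
      · exfalso
        have hle := hA3 (nm[jB], pvScore raw (nm[jB]))
          (List.mem_map_of_mem (f := fun tn => (tn, pvScore raw tn)) (List.getElem_mem hjB))
        have hgt' : (1 : Int) < q.2 := by rw [hqeq] at hBgt; exact hBgt
        rw [hqe] at hgt'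
        simp only at hgt' hle
        omega

-- ===== VERDICT (by name: the statement is the Claim_ definition above) =====
theorem build_theme_lessons_spec : Claim_equal_build_theme_lessons := by
  intro mapping themes _hdom hpre
  unfold Spec_build_theme_lessons build_theme_lessons build_theme_lessons_alt
  refine congrArg PySem.Dict.items ?_
  refine PySem.List.foldl_congr_mem _ _ _ _ ?_
  intro acc p hp
  have hraw : p.2 ∈ (PySem.Dict.ofList mapping).values := List.mem_map_of_mem hp
  have := pvKey_eq themes p.2 (fun hc => hpre p.2 hraw hc)
  rw [this]
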